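-- pv_equiv track=rewrite | github.com/ewhacote/ewhaCote_gmkim | week5/0727_142085_gmkim.py | solution
-- ===== SOURCE A (Python) =====
-- from heapq import heappop, heappush
--
-- def solution(n, k, enemy):
--     answer, total_enemy = 0, 0
--     heap = []
--
--     for e in enemy:
--         heappush(heap, -e)
--         total_enemy += e
--
--         if total_enemy > n:
--             if k == 0: break
--             total_enemy += heappop(heap)
--             k -= 1
--
--         answer += 1
--
--     return answer
-- ===== SOURCE B (Python) =====
-- def solution(n, k, enemy):
--     # Amortized-rebuild structure instead of a heap: a sorted descending
--     # snapshot consumed from the left by `ptr`, plus a small unordered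
--     # `pending` buffer; when the buffer outgrows the square root of the live
--     # size, everything is re-sorted in one pass.
--     desc = []     # descending snapshot of un-bypassed fought enemies
--     ptr = 0       # desc[ptr:] is the still-live part of the snapshot
--     pending = []  # fought since the last rebuild, unordered
--     total = 0
--     for i, e in enumerate(enemy):
--         total += e
--         pending.append(e)
--         if len(pending) * len(pending) > (len(desc) - ptr) + len(pending):
--             desc = sorted(desc[ptr:] + pending, reverse=True)
--             ptr, pending = 0, []
--         if total > n:
--             if k == 0:
--                 return i
--             if pending and (ptr >= len(desc) or max(pending) >= desc[ptr]):
--                 big = max(pending)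
--                 pending.remove(big)
--             else:
--                 big = desc[ptr]
--                 ptr += 1
--             total -= big
--             k -= 1
--     return len(enemy)
-- ===== Notes on version B (the rewrite author's own statement) =====
-- stated objective: alternative
-- what changed: Replaces A's heap with an amortized-rebuild structure: a sorted-descending snapshot consumed from the left by a pointer plus a small unordered pending buffer, re-sorted wholesale whenever the buffer outgrows the square root of the live size; the bypass target is taken from the snapshot head or from the buffer by max()+remove() instead of a heappop.
import Mathlib
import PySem

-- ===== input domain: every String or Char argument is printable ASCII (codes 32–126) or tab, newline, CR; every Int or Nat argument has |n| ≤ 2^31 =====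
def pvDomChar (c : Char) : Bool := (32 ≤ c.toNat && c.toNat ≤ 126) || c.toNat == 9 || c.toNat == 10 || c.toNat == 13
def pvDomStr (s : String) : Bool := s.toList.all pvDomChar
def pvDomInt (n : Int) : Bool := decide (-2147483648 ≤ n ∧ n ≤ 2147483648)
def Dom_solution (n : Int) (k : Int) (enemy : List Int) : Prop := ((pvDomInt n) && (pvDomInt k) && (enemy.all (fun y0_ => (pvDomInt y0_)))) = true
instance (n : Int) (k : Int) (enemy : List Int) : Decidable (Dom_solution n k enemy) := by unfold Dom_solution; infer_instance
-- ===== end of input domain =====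

-- B replaces A's heap by an amortized-rebuild structure: a sorted descending snapshot consumed
-- from the left by a pointer plus a small unordered pending buffer, re-sorted wholesale when the
-- buffer outgrows the square root of the live size (objective: alternative; same cost class).

-- ===== PORT A =====
-- heapq is modelled as a sorted ascending list: heappush = ordered insert, heappop = take the
-- head (the minimum). This is exact for values: the Python observes the heap only through
-- heappop, which always returns the minimum element of the current multiset.
def pushA (x : Int) : List Int → List Int
  | [] => [x]
  | y :: t => if x ≤ y then x :: y :: t else y :: pushA x t

-- the for-loop of A; state = (answer, total_enemy, heap, k); 'break' returns answer
def loopA (n : Int) : List Int → Int → Int → List Int → Int → Int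
  | [], answer, _, _, _ => answer
  | e :: rest, answer, total, heap, k =>
      let heap' := pushA (-e) heap
      let total' := total + e
      if total' > n then
        if k = 0 then answer
        else loopA n rest (answer + 1) (total' + heap'.headI) heap'.tail (k - 1)
      else loopA n rest (answer + 1) total' heap' k

def solution (n : Int) (k : Int) (enemy : List Int) : Int :=
  loopA n enemy 0 0 [] k

-- ===== PORT B =====
-- the for-loop of Source B; state = (i, total, desc, ptr, pending, k). ptr is nonnegative and
-- never exceeds len(desc) in Python, so it is carried as a Nat and desc[ptr:] is desc.drop ptr;
-- sorted(..., reverse=True) is PySem.List.sorted … true; max(pending) is PySem.List.max?;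
-- pending.remove(big) is PySem.List.remove? (its none case and the 0-default of desc[ptr] are
-- unreachable: when read, pending is nonempty resp. ptr < len(desc), per the loop invariant).
def loopB (n : Int) : List Int → Int → Int → List Int → Nat → List Int → Int → Int
  | [], i, _, _, _, _, _ => i
  | e :: rest, i, total, desc, ptr, pending, k =>
      let total' := total + e
      let pend' := pending ++ [e]
      let st :=
        if pend'.length * pend'.length > (desc.length - ptr) + pend'.length then
          (PySem.List.sorted (desc.drop ptr ++ pend') (fun x => x) true, 0, ([] : List Int))
        else (desc, ptr, pend')
      match st with
      | (desc1, ptr1, pending1) =>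
        if total' > n then
          if k = 0 then i
          else
            if pending1 ≠ [] ∧ (ptr1 ≥ desc1.length ∨
                (PySem.List.max? pending1 (fun x => x)).getD 0 ≥ desc1.getD ptr1 0) then
              match PySem.List.remove? pending1 ((PySem.List.max? pending1 (fun x => x)).getD 0) with
              | none => i
              | some pend2 =>
                  loopB n rest (i + 1) (total' - (PySem.List.max? pending1 (fun x => x)).getD 0)
                    desc1 ptr1 pend2 (k - 1)
            else
              loopB n rest (i + 1) (total' - desc1.getD ptr1 0) desc1 (ptr1 + 1) pending1 (k - 1)
        else loopB n rest (i + 1) total' desc1 ptr1 pending1 k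

def solution_alt (n : Int) (k : Int) (enemy : List Int) : Int :=
  loopB n enemy 0 0 [] 0 [] k

-- ===== PRECONDITION & SPEC =====
def Spec_solution (n : Int) (k : Int) (enemy : List Int) (out : Int) : Prop := out = solution_alt n k enemy
instance (n : Int) (k : Int) (enemy : List Int) (out : Int) : Decidable (Spec_solution n k enemy out) := by unfold Spec_solution; infer_instance

-- ===== CLAIM (what is proved, stated in full; the proofs are below) =====
def Claim_equal_solution : Prop := ∀ (n : Int) (k : Int) (enemy : List Int), Dom_solution n k enemy → Spec_solution n k enemy (solution n k enemy)

-- ===== LEMMAS AND PROOFS =====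

theorem pushA_perm (x : Int) (l : List Int) : (pushA x l).Perm (x :: l) := by
  induction l with
  | nil => simp [pushA]
  | cons y t ih =>
      simp only [pushA]
      split
      · exact List.Perm.refl _
      · exact (List.Perm.cons y ih).trans (List.Perm.swap x y t)

theorem pushA_pairwise (x : Int) (l : List Int) (h : l.Pairwise (· ≤ ·)) :
    (pushA x l).Pairwise (· ≤ ·) := by
  induction l with
  | nil => simp [pushA]
  | cons y t ih =>
      rw [List.pairwise_cons] at h
      simp only [pushA]
      split
      · rename_i hx
        rw [List.pairwise_cons]
        refine ⟨?_, by rw [List.pairwise_cons]; exact h⟩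
        intro b hb
        rcases List.mem_cons.mp hb with rfl | hb
        · omega
        · exact le_trans hx (h.1 b hb)
      · rename_i hx
        rw [List.pairwise_cons]
        refine ⟨?_, ih h.2⟩
        intro b hb
        rcases List.mem_cons.mp ((pushA_perm x t).mem_iff.mp hb) with rfl | hb
        · omega
        · exact h.1 b hb

-- negation turns the multiset of live enemies into A's heap contents
theorem map_neg_erase (l : List Int) (v : Int) :
    (l.erase v).map (fun x => -x) = (l.map (fun x => -x)).erase (-v) := by
  have : Function.Injective (fun x : Int => -x) := fun a b h => by simpa using h
  simpa using List.map_erase this (a := v) l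

-- popping from A's heap: if the heap is the sorted negation of `combined` and `big` is a
-- maximal element of `combined`, the head is -big and the tail is `combined` minus one `big`
theorem heap_pop (heap combined : List Int) (big : Int)
    (hsort : heap.Pairwise (· ≤ ·))
    (hperm : heap.Perm (combined.map (fun x => -x)))
    (hmem : big ∈ combined) (hmax : ∀ y ∈ combined, y ≤ big) :
    heap.headI = -big ∧ heap.tail.Pairwise (· ≤ ·) ∧
      heap.tail.Perm ((combined.erase big).map (fun x => -x)) := by
  obtain ⟨h0, t0, rfl⟩ : ∃ h0 t0, heap = h0 :: t0 := by
    cases hh : heap with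
    | nil =>
        exfalso
        have := hperm.length_eq
        rw [hh] at this
        have : combined.length = 0 := by simpa using this.symm
        exact absurd (List.length_eq_zero_iff.mp this ▸ hmem) (List.not_mem_nil)
    | cons h0 t0 => exact ⟨h0, t0, rfl⟩
  have hh0min : ∀ z ∈ h0 :: t0, h0 ≤ z := by
    intro z hz
    rcases List.mem_cons.mp hz with rfl | hz
    · exact le_refl _
    · exact (List.pairwise_cons.mp hsort).1 z hz
  obtain ⟨y, hy, hyh0⟩ : ∃ y ∈ combined, -y = h0 := by
    rcases List.mem_map.mp (hperm.mem_iff.mp List.mem_cons_self) with ⟨y, hy, hyeq⟩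
    exact ⟨y, hy, hyeq⟩
  have hh0 : h0 = -big := by
    have h1 : h0 ≤ -big := hh0min _ (hperm.mem_iff.mpr (List.mem_map.mpr ⟨big, hmem, rfl⟩))
    have h2 : y ≤ big := hmax y hy
    omega
  refine ⟨hh0, (List.pairwise_cons.mp hsort).2, ?_⟩
  rw [map_neg_erase]
  have hperase := hperm.erase (-big)
  have : (h0 :: t0).erase (-big) = t0 := by rw [← hh0]; simp
  rwa [this] at hperase

-- one loop step after the (possible) rebuild: A's pop agrees with B's snapshot/pending choice
theorem pop_eq (n : Int) (rest : List Int) (i total e k : Int)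
    (heap' desc1 pending1 : List Int) (ptr1 : Nat)
    (hsort' : heap'.Pairwise (· ≤ ·))
    (hperm1 : heap'.Perm ((desc1.drop ptr1 ++ pending1).map (fun x => -x)))
    (hdesc1 : (desc1.drop ptr1).Pairwise (fun a b => b ≤ a))
    (hne : desc1.drop ptr1 ++ pending1 ≠ [])
    (IH : ∀ (i total : Int) (desc : List Int) (ptr : Nat) (pending heap : List Int) (k : Int),
      heap.Pairwise (· ≤ ·) →
      heap.Perm ((desc.drop ptr ++ pending).map (fun x => -x)) →
      (desc.drop ptr).Pairwise (fun a b => b ≤ a) →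
      loopA n rest i total heap k = loopB n rest i total desc ptr pending k) :
    (if total + e > n then
        if k = 0 then i
        else loopA n rest (i + 1) (total + e + heap'.headI) heap'.tail (k - 1)
      else loopA n rest (i + 1) (total + e) heap' k)
    =
    (if total + e > n then
        if k = 0 then i
        else
          if pending1 ≠ [] ∧ (ptr1 ≥ desc1.length ∨
              (PySem.List.max? pending1 (fun x => x)).getD 0 ≥ desc1.getD ptr1 0) then
            match PySem.List.remove? pending1 ((PySem.List.max? pending1 (fun x => x)).getD 0) with
            | none => i
            | some pend2 =>
                loopB n rest (i + 1) (total + e - (PySem.List.max? pending1 (fun x => x)).getD 0)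
                  desc1 ptr1 pend2 (k - 1)
          else
            loopB n rest (i + 1) (total + e - desc1.getD ptr1 0) desc1 (ptr1 + 1) pending1 (k - 1)
      else loopB n rest (i + 1) (total + e) desc1 ptr1 pending1 k) := by
  by_cases ht : total + e > n
  swap
  · rw [if_neg ht, if_neg ht]
    exact IH _ _ _ _ _ _ _ hsort' hperm1 hdesc1
  rw [if_pos ht, if_pos ht]
  by_cases hk : k = 0
  · rw [if_pos hk, if_pos hk]
  rw [if_neg hk, if_neg hk]
  by_cases hc : pending1 ≠ [] ∧ (ptr1 ≥ desc1.length ∨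
      (PySem.List.max? pending1 (fun x => x)).getD 0 ≥ desc1.getD ptr1 0)
  · rw [if_pos hc]
    -- the pending buffer holds the maximum: remove it there
    obtain ⟨hpne, hor⟩ := hc
    obtain ⟨mp, hmp⟩ : ∃ m, PySem.List.max? pending1 (fun x => x) = some m := by
      rcases h : PySem.List.max? pending1 (fun x => x) with _ | m
      · exact absurd ((PySem.List.max?_eq_none_iff _ _).mp h) hpne
      · exact ⟨m, rfl⟩
    have hmpmem : mp ∈ pending1 := PySem.List.max?_mem hmp
    have hmpmax : ∀ y ∈ pending1, y ≤ mp := fun y hy => PySem.List.max?_isMax hmp y hy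
    rw [hmp] at hor ⊢
    simp only [Option.getD_some] at hor ⊢
    have hmem : mp ∈ desc1.drop ptr1 ++ pending1 := List.mem_append_right _ hmpmem
    have hmax : ∀ y ∈ desc1.drop ptr1 ++ pending1, y ≤ mp := by
      intro y hy
      rcases List.mem_append.mp hy with hy | hy
      swap
      · exact hmpmax y hy
      by_cases hlt : ptr1 < desc1.length
      · have hdd : desc1.drop ptr1 = desc1[ptr1] :: desc1.drop (ptr1 + 1) :=
          List.drop_eq_getElem_cons hlt
        have hpw := hdesc1
        rw [hdd] at hpw
        have hd_le : desc1[ptr1] ≤ mp := by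
          rcases hor with hge | hge
          · omega
          · rwa [List.getD_eq_getElem _ _ hlt] at hge
        rw [hdd] at hy
        rcases List.mem_cons.mp hy with rfl | hy
        · exact hd_le
        · exact le_trans ((List.pairwise_cons.mp hpw).1 y hy) hd_le
      · rw [List.drop_eq_nil_of_le (by omega)] at hy
        exact absurd hy List.not_mem_nil
    obtain ⟨hhead, htsort, htperm⟩ := heap_pop heap' _ _ hsort' hperm1 hmem hmax
    simp only [PySem.List.remove?_eq_some_erase _ mp hmpmem]
    rw [hhead]
    have harith : total + e + -mp = total + e - mp := by ring
    rw [harith]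
    refine IH _ _ _ _ _ _ _ htsort ?_ hdesc1
    have hEp : ((desc1.drop ptr1 ++ pending1).erase mp).Perm
        (desc1.drop ptr1 ++ pending1.erase mp) := by
      have h1 : (desc1.drop ptr1 ++ pending1).Perm
          (mp :: (desc1.drop ptr1 ++ pending1).erase mp) := List.perm_cons_erase hmem
      have h2 : (desc1.drop ptr1 ++ pending1).Perm
          (mp :: (desc1.drop ptr1 ++ pending1.erase mp)) := by
        refine (List.Perm.append_left (desc1.drop ptr1) (List.perm_cons_erase hmpmem)).trans ?_
        exact List.perm_middle
      exact (h1.symm.trans h2).cons_inv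
    exact htperm.trans (hEp.map _)
  · rw [if_neg hc]
    -- the snapshot head is the maximum: advance the pointer
    have hlt : ptr1 < desc1.length := by
      by_contra hge
      by_cases hpe : pending1 = []
      · subst hpe
        rw [List.drop_eq_nil_of_le (by omega)] at hne
        exact hne rfl
      · exact hc ⟨hpe, Or.inl (by omega)⟩
    have hdd : desc1.drop ptr1 = desc1[ptr1] :: desc1.drop (ptr1 + 1) :=
      List.drop_eq_getElem_cons hlt
    have hpw := hdesc1
    rw [hdd] at hpw
    have hgetD : desc1.getD ptr1 0 = desc1[ptr1] := List.getD_eq_getElem _ _ hlt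
    have hmax : ∀ y ∈ desc1.drop ptr1 ++ pending1, y ≤ desc1[ptr1] := by
      intro y hy
      rcases List.mem_append.mp hy with hy | hy
      · rw [hdd] at hy
        rcases List.mem_cons.mp hy with rfl | hy
        · exact le_refl _
        · exact (List.pairwise_cons.mp hpw).1 y hy
      · -- pending is nonempty here, and its maximum is below the snapshot head
        have hpne : pending1 ≠ [] := by
          intro hpe; rw [hpe] at hy; exact absurd hy List.not_mem_nil
        obtain ⟨mp, hmp⟩ : ∃ m, PySem.List.max? pending1 (fun x => x) = some m := by
          rcases h : PySem.List.max? pending1 (fun x => x) with _ | m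
          · exact absurd ((PySem.List.max?_eq_none_iff _ _).mp h) hpne
          · exact ⟨m, rfl⟩
        have hmpd : mp < desc1.getD ptr1 0 := by
          by_contra hge
          refine hc ⟨hpne, Or.inr ?_⟩
          rw [hmp, Option.getD_some]
          omega
        have hymp : y ≤ mp := PySem.List.max?_isMax hmp y hy
        rw [hgetD] at hmpd
        omega
    have hmem : desc1[ptr1] ∈ desc1.drop ptr1 ++ pending1 := by
      rw [hdd]; exact List.mem_append_left _ List.mem_cons_self
    obtain ⟨hhead, htsort, htperm⟩ := heap_pop heap' _ _ hsort' hperm1 hmem hmax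
    rw [hhead, hgetD]
    have harith : total + e + -desc1[ptr1] = total + e - desc1[ptr1] := by ring
    rw [harith]
    refine IH _ _ _ _ _ _ _ htsort ?_ ?_
    · have hE : (desc1.drop ptr1 ++ pending1).erase desc1[ptr1]
          = desc1.drop (ptr1 + 1) ++ pending1 := by
        rw [hdd, List.cons_append, List.erase_cons_head]
      rwa [hE] at htperm
    · exact (List.pairwise_cons.mp hpw).2

-- main invariant: A's heap is the ≤-sorted negation of B's live multiset desc[ptr:] ++ pending,
-- and desc[ptr:] is sorted descending
theorem loopA_eq_loopB (n : Int) :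
    ∀ (es : List Int) (i total : Int) (desc : List Int) (ptr : Nat) (pending heap : List Int) (k : Int),
      heap.Pairwise (· ≤ ·) →
      heap.Perm ((desc.drop ptr ++ pending).map (fun x => -x)) →
      (desc.drop ptr).Pairwise (fun a b => b ≤ a) →
      loopA n es i total heap k = loopB n es i total desc ptr pending k := by
  intro es
  induction es with
  | nil => intro i total desc ptr pending heap k _ _ _; rfl
  | cons e rest ih =>
      intro i total desc ptr pending heap k hsort hperm hdesc
      simp only [loopA, loopB]
      set heap' := pushA (-e) heap with hheap'
      have hsort' : heap'.Pairwise (· ≤ ·) := pushA_pairwise _ _ hsort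
      have hperm0 : heap'.Perm (((desc.drop ptr ++ pending) ++ [e]).map (fun x => -x)) := by
        refine (pushA_perm _ _).trans ?_
        rw [List.map_append, List.map_cons, List.map_nil]
        exact (List.Perm.cons _ hperm).trans (List.perm_append_singleton _ _).symm
      by_cases hreb : (pending ++ [e]).length * (pending ++ [e]).length > (desc.length - ptr) + (pending ++ [e]).length
      · rw [if_pos hreb]
        simp only
        refine pop_eq n rest i total e k heap' _ _ _ hsort' ?_ ?_ ?_ ih
        · rw [List.drop_zero, List.append_nil]
          refine hperm0.trans ?_
          refine List.Perm.map _ ?_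
          rw [List.append_assoc]
          exact (PySem.List.sorted_perm _ _ _).symm
        · rw [List.drop_zero]
          have := PySem.List.sorted_pairwise_rev (desc.drop ptr ++ (pending ++ [e])) (fun x : Int => x)
          simpa using this
        · rw [List.drop_zero, List.append_nil]
          intro hnil
          rw [PySem.List.sorted_eq_nil_iff] at hnil
          simp at hnil
      · rw [if_neg hreb]
        simp only
        refine pop_eq n rest i total e k heap' _ _ _ hsort' ?_ hdesc ?_ ih
        · rwa [← List.append_assoc]
        · intro hnil
          simp at hnil

-- ===== VERDICT (by name: the statement is the Claim_ definition above) =====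
theorem solution_spec : Claim_equal_solution := by
  intro n k enemy _
  unfold Spec_solution solution solution_alt
  exact loopA_eq_loopB n enemy 0 0 [] 0 [] [] k (by simp) (by simp) (by simp)
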